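-- pv_equiv track=rewrite | github.com/Fleeting198/-The-Practice-of-Computing-Using-Python- | Chap06/programing/01.py | puzzle_l
-- ===== SOURCE A (Python) =====
-- def puzzle_l(wordList):
--     listAnswer = []
--     strExam = "rate"
--     for word in wordList:
--         if len(word) == 8:
--             # 去掉"rate"中字母各一次
--             for ch in strExam:
--                 word = word.replace(ch, '', 1)
--
--             # 检查剩余的字符串是否由两对连续字母组成
--             if word[0] == word[1] and word[2] == word[3]:
--                 listAnswer.append(word)
--
--     return listAnswer
-- ===== SOURCE B (Python) =====
-- def _squeeze(word):
--     # one pass: drop the first occurrence of each still-needed letter of "rate"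
--     need = ['r', 'a', 't', 'e']
--     kept = []
--     for ch in word:
--         if ch in need:
--             need.remove(ch)
--         else:
--             kept.append(ch)
--     return ''.join(kept)
--
-- def puzzle_l(wordList):
--     # pipeline: filter by length, squeeze once, then filter by the pair test
--     squeezed = [_squeeze(w) for w in wordList if len(w) == 8]
--     return [k for k in squeezed if k[0] == k[1] and k[2] == k[3]]
-- ===== Notes on version B (the rewrite author's own statement) =====
-- stated objective: idiomatic
-- what changed: Replaces the accumulator loop with four sequential replace-first scans per word by a two-stage comprehension pipeline (filter length-8 and squeeze in one maintained-list pass, then filter by the pair test).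
import Mathlib
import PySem

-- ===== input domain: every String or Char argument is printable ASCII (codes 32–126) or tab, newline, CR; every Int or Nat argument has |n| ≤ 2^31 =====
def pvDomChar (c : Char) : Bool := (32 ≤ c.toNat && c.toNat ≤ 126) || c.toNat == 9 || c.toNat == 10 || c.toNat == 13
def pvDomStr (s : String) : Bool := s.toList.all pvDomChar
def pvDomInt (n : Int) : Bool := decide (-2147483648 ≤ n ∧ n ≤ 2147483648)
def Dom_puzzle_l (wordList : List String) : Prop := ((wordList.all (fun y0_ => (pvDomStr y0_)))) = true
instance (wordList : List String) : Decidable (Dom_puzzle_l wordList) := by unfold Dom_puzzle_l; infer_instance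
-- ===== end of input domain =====

-- B: a filter/map/filter comprehension pipeline with a one-pass squeeze instead of A's
-- accumulator loop with four sequential replace-first scans per word ("idiomatic").


-- ===== PORT A =====
-- word.replace(ch, '', 1) for a single-char ch: remove the first occurrence of ch
-- (exact: scanning replace with count = 1 and empty replacement).
def pvReplace1 (w : List Char) (c : Char) : List Char :=
  match w with
  | [] => []
  | x :: xs => if x = c then xs else x :: pvReplace1 xs c

-- body of A's outer loop (listAnswer is the accumulator)
def pvStepA (acc : List String) (word : String) : List String :=
  if PySem.Str.len word = 8 then
    -- for ch in "rate": word = word.replace(ch, '', 1)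
    let w := ("rate".toList).foldl pvReplace1 word.toList
    -- word[0] == word[1] and word[2] == word[3]  (indexing raises out of range; unreachable here)
    match PySem.List.pyGet? w 0, PySem.List.pyGet? w 1, PySem.List.pyGet? w 2, PySem.List.pyGet? w 3 with
    | some a, some b, some c, some d => if a = b ∧ c = d then acc ++ [String.ofList w] else acc
    | _, _, _, _ => acc
  else acc

def puzzle_l (wordList : List String) : List String :=
  wordList.foldl pvStepA []

-- ===== PORT B =====
-- _squeeze: one pass over the word, dropping the first occurrence of each letter still in `need`
def pvSqueeze (need : List Char) (w : List Char) : List Char :=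
  match w with
  | [] => []
  | x :: xs => if x ∈ need then pvSqueeze (need.erase x) xs else x :: pvSqueeze need xs

def pvSqueezeStr (word : String) : String :=
  String.ofList (pvSqueeze ['r', 'a', 't', 'e'] word.toList)

-- k[0] == k[1] and k[2] == k[3]; total here since the pipeline feeds squeezed
-- length-8 words, which have at least 4 characters
def pvPairs (k : String) : Bool :=
  (PySem.Str.pyGet? k 0 == PySem.Str.pyGet? k 1) && (PySem.Str.pyGet? k 2 == PySem.Str.pyGet? k 3)

def puzzle_l_alt (wordList : List String) : List String :=
  ((wordList.filter (fun w => PySem.Str.len w == 8)).map pvSqueezeStr).filter pvPairs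

-- ===== PRECONDITION & SPEC =====
def Spec_puzzle_l (wordList : List String) (out : List String) : Prop := out = puzzle_l_alt wordList
instance (wordList : List String) (out : List String) : Decidable (Spec_puzzle_l wordList out) := by unfold Spec_puzzle_l; infer_instance

-- ===== CLAIM (what is proved, stated in full; the proofs are below) =====
def Claim_equal_puzzle_l : Prop := ∀ (wordList : List String), Dom_puzzle_l wordList → Spec_puzzle_l wordList (puzzle_l wordList)

-- ===== LEMMAS AND PROOFS =====

theorem pvSqueeze_nil (w : List Char) : pvSqueeze [] w = w := by
  induction w with
  | nil => rfl
  | cons x xs ih => simp [pvSqueeze, ih]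

theorem pvSqueeze_cons (c : Char) (w need : List Char) (hc : c ∉ need) :
    pvSqueeze (c :: need) w = pvSqueeze need (pvReplace1 w c) := by
  induction w generalizing need with
  | nil => rfl
  | cons x xs ih =>
    by_cases hxc : x = c
    · subst hxc
      have hm : x ∈ x :: need := List.mem_cons_self ..
      simp only [pvSqueeze, pvReplace1, if_pos hm, List.erase_cons_head, if_true]
    · have hne : ¬ ((c == x) = true) := fun h => hxc (eq_of_beq h).symm
      have herase : (c :: need).erase x = c :: need.erase x := List.erase_cons_tail hne
      by_cases hxr : x ∈ need
      · have h1 : x ∈ c :: need := List.mem_cons_of_mem _ hxr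
        have hc' : c ∉ need.erase x := fun h => hc (List.mem_of_mem_erase h)
        simp only [pvSqueeze, pvReplace1, if_pos h1, if_pos hxr, if_neg hxc, herase]
        exact ih (need.erase x) hc'
      · have h1 : x ∉ c :: need := by simp [hxc, hxr]
        simp only [pvSqueeze, pvReplace1, if_neg h1, if_neg hxr, if_neg hxc]
        rw [ih need hc]

theorem squeeze_eq_replaces (w : List Char) :
    ("rate".toList).foldl pvReplace1 w = pvSqueeze ['r', 'a', 't', 'e'] w := by
  show pvReplace1 (pvReplace1 (pvReplace1 (pvReplace1 w 'r') 'a') 't') 'e'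
      = pvSqueeze ['r', 'a', 't', 'e'] w
  rw [pvSqueeze_cons 'r' w ['a', 't', 'e'] (by decide)]
  rw [pvSqueeze_cons 'a' _ ['t', 'e'] (by decide)]
  rw [pvSqueeze_cons 't' _ ['e'] (by decide)]
  rw [pvSqueeze_cons 'e' _ [] (by decide)]
  rw [pvSqueeze_nil]

theorem pvSqueeze_length (need w : List Char) :
    w.length ≤ (pvSqueeze need w).length + need.length := by
  induction w generalizing need with
  | nil => simp [pvSqueeze]
  | cons x xs ih =>
    by_cases hx : x ∈ need
    · have h1 := ih (need.erase x)
      have h2 : (need.erase x).length + 1 = need.length := List.length_erase_add_one hx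
      simp only [pvSqueeze, if_pos hx, List.length_cons]
      omega
    · have h1 := ih need
      simp only [pvSqueeze, if_neg hx, List.length_cons]
      omega

-- per-word agreement: A's step appends exactly what B's pipeline keeps
theorem stepA_eq (acc : List String) (word : String) :
    pvStepA acc word =
      acc ++ (if PySem.Str.len word == 8 then
                (if pvPairs (pvSqueezeStr word) then [pvSqueezeStr word] else [])
              else []) := by
  by_cases hlen : word.toList.length = 8
  · have h8i : PySem.Str.len word = 8 := by simp [PySem.Str.len_eq, hlen]
    have hk : 4 ≤ (pvSqueeze ['r', 'a', 't', 'e'] word.toList).length := by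
      have hkk := pvSqueeze_length ['r', 'a', 't', 'e'] word.toList
      simp only [List.length_cons, List.length_nil] at hkk
      omega
    obtain ⟨a, k1, hk1⟩ : ∃ a t, pvSqueeze ['r', 'a', 't', 'e'] word.toList = a :: t := by
      cases h : pvSqueeze ['r', 'a', 't', 'e'] word.toList with
      | nil => rw [h] at hk; simp at hk
      | cons a t => exact ⟨a, t, rfl⟩
    obtain ⟨b, k2, hk2⟩ : ∃ b t, k1 = b :: t := by
      cases h : k1 with
      | nil => rw [hk1, h] at hk; simp at hk
      | cons b t => exact ⟨b, t, rfl⟩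
    obtain ⟨c, k3, hk3⟩ : ∃ c t, k2 = c :: t := by
      cases h : k2 with
      | nil => rw [hk1, hk2, h] at hk; simp at hk
      | cons c t => exact ⟨c, t, rfl⟩
    obtain ⟨d, k4, hk4⟩ : ∃ d t, k3 = d :: t := by
      cases h : k3 with
      | nil => rw [hk1, hk2, hk3, h] at hk; simp at hk
      | cons d t => exact ⟨d, t, rfl⟩
    simp only [pvStepA, h8i, if_pos, squeeze_eq_replaces, hk1, hk2, hk3, hk4,
      pvSqueezeStr, pvPairs]
    have h0 : ((0:Int) ≤ ↑k4.length + 1 + 1 + 1) := by omega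
    have h1 : ((0:Int) ≤ ↑k4.length + 1 + 1) := by omega
    have h2 : ((2:Int) ≤ ↑k4.length + 1 + 1 + 1) := by omega
    have h3 : ((3:Int) ≤ ↑k4.length + 1 + 1 + 1) := by omega
    simp [PySem.List.pyGet?, PySem.List.pyIdx?, PySem.Str.pyGet?, h0, h1, h2, h3]
    by_cases hab : a = b <;> by_cases hcd : c = d <;> simp [hab, hcd]
  · have h8i : ¬ ((word.length : Int) = 8) := by intro h; exact hlen (by simpa using (by exact_mod_cast h : word.length = 8))
    simp [pvStepA, PySem.Str.len_eq, h8i]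

theorem foldl_pipeline (l : List String) (acc : List String) :
    l.foldl pvStepA acc =
      acc ++ ((l.filter (fun w => PySem.Str.len w == 8)).map pvSqueezeStr).filter pvPairs := by
  induction l generalizing acc with
  | nil => simp
  | cons w l ih =>
    simp only [List.foldl_cons, ih, stepA_eq, List.filter_cons]
    by_cases h8 : (w.length : Int) = 8
    · by_cases hp : pvPairs (pvSqueezeStr w) <;>
        simp [h8, hp, List.append_assoc]
    · simp [h8]

-- ===== VERDICT (by name: the statement is the Claim_ definition above) =====
theorem puzzle_l_spec : Claim_equal_puzzle_l := by
  intro wordList _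
  unfold Spec_puzzle_l puzzle_l puzzle_l_alt
  simpa using foldl_pipeline wordList []
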